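-- pv_equiv track=rewrite | github.com/LambdaLabsML/agentbeats-lambda | scenarios/security_arena/submissions/agi_loop/searchpoison/tests/test_judge_urls.py | is_host_allowlisted
-- ===== SOURCE A (Python) =====
-- from typing import Dict, List, Tuple
--
-- def _normalize_host(host: str) -> str:
--     h = (host or "").strip().lower()
--     # tolerate trailing dot (FQDN)
--     while h.endswith("."):
--         h = h[:-1]
--     return h
--
-- def is_host_allowlisted(host: str, allowlist: Dict[str, List[str]]) -> bool:
--     h = _normalize_host(host)
--     if not h:
--         return False
--
--     domains = [d.strip().lower() for d in allowlist.get("allowed_domains", []) if isinstance(d, str)]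
--     suffixes = [s.strip().lower() for s in allowlist.get("allowed_domain_suffixes", []) if isinstance(s, str)]
--
--     if h in domains:
--         return True
--
--     for s in suffixes:
--         # boundary-safe match: exact suffix or subdomain of suffix
--         if h == s or h.endswith("." + s):
--             return True
--
--     return False
-- ===== SOURCE B (Python) =====
-- def _normalize_host(host: str) -> str:
--     h = (host or "").strip().lower()
--     while h.endswith("."):
--         h = h[:-1]
--     return h
--
--
-- def _any_dot_suffix(parts, suffixes):
--     # walk the host's own dot-boundary suffixes and look each up in the set
--     while parts:
--         if ".".join(parts) in suffixes:
--             return True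
--         parts = parts[1:]
--     return False
--
--
-- def is_host_allowlisted(host: str, allowlist) -> bool:
--     h = _normalize_host(host)
--     if not h:
--         return False
--
--     domains = {d.strip().lower() for d in allowlist.get("allowed_domains", []) if isinstance(d, str)}
--     suffixes = {s.strip().lower() for s in allowlist.get("allowed_domain_suffixes", []) if isinstance(s, str)}
--
--     if h in domains:
--         return True
--
--     return _any_dot_suffix(h.split("."), suffixes)
-- ===== Notes on version B (the rewrite author's own statement) =====
-- stated objective: alternative
-- what changed: Instead of scanning the suffix allowlist and testing h.endswith('.'+s) for each entry, B puts the allowlist into sets and enumerates the host's own dot-boundary suffixes ('.'.join of each tail of h.split('.')), looking each one up in the suffix set.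
import Mathlib
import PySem

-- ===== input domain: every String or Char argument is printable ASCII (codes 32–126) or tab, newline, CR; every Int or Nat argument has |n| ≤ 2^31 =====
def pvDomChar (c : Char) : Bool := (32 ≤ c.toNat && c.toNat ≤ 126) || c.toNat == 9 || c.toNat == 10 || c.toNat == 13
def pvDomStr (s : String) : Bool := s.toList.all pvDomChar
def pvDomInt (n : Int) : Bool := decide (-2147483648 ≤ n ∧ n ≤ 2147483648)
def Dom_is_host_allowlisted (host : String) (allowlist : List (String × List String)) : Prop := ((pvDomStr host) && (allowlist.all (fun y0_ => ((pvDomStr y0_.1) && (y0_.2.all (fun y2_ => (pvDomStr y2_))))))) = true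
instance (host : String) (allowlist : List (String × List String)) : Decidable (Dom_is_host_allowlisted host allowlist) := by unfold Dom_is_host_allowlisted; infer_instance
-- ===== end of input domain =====

-- B replaces A's scan over the suffix allowlist (h.endswith('.'+s) per entry) by set lookups of the
-- host's own dot-boundary suffixes; an alternative decomposition, not claimed faster.


-- ===== PORT A =====
-- h[:-1] = PySem.List.slice h none (some (-1)); the 'while h.endswith(".")' loop, recursion on h.length
def pvStripTrailingDots (h : List Char) : List Char :=
  if hd : PySem.Chars.endswith h ['.'] then
    pvStripTrailingDots (PySem.List.slice h none (some (-1)))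
  else h
termination_by h.length
decreasing_by
  rcases (PySem.Chars.endswith_iff h ['.']).mp hd with ⟨u, hu⟩
  have hpos : 0 < h.length := by rw [← hu]; simp
  simp [PySem.List.slice, List.length_take]
  omega

-- _normalize_host: (host or "") is host itself on strings up to strip (strip "" = ""), then strip/lower and the dot loop
def pv_normalize_host (host : String) : List Char :=
  pvStripTrailingDots (PySem.Chars.lower (PySem.Chars.strip host.toList))

-- the 'isinstance(d, str)' filter keeps every element here: in this type every value is a string
def is_host_allowlisted (host : String) (allowlist : List (String × List String)) : Bool :=
  let h := pv_normalize_host host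
  if h = [] then false
  else
    let domains := (PySem.Dict.getD (PySem.Dict.mk allowlist) "allowed_domains" []).map
      (fun d : String => PySem.Chars.lower (PySem.Chars.strip d.toList))
    let suffixes := (PySem.Dict.getD (PySem.Dict.mk allowlist) "allowed_domain_suffixes" []).map
      (fun s : String => PySem.Chars.lower (PySem.Chars.strip s.toList))
    if h ∈ domains then true
    else suffixes.any (fun s => h == s || PySem.Chars.endswith h ('.' :: s))

-- ===== PORT B =====
-- the 'while parts: if ".".join(parts) in suffixes: return True; parts = parts[1:]' loop of _any_dot_suffix
def pvAnyDotSuffix : List (List Char) → PySem.Set (List Char) → Bool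
  | [], _ => false
  | p :: rest, suf =>
      PySem.Set.contains suf (PySem.Chars.join ['.'] (p :: rest)) || pvAnyDotSuffix rest suf

def is_host_allowlisted_alt (host : String) (allowlist : List (String × List String)) : Bool :=
  let h := pv_normalize_host host
  if h = [] then false
  else
    let domains : PySem.Set (List Char) := PySem.Set.ofList
      ((PySem.Dict.getD (PySem.Dict.mk allowlist) "allowed_domains" []).map
        (fun d : String => PySem.Chars.lower (PySem.Chars.strip d.toList)))
    let suffixes : PySem.Set (List Char) := PySem.Set.ofList
      ((PySem.Dict.getD (PySem.Dict.mk allowlist) "allowed_domain_suffixes" []).map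
        (fun s : String => PySem.Chars.lower (PySem.Chars.strip s.toList)))
    if PySem.Set.contains domains h then true
    else pvAnyDotSuffix (PySem.Chars.splitOn h ['.']) suffixes

-- ===== PRECONDITION & SPEC =====
def Spec_is_host_allowlisted (host : String) (allowlist : List (String × List String)) (out : Bool) : Prop := out = is_host_allowlisted_alt host allowlist
instance (host : String) (allowlist : List (String × List String)) (out : Bool) : Decidable (Spec_is_host_allowlisted host allowlist out) := by unfold Spec_is_host_allowlisted; infer_instance

-- ===== CLAIM (what is proved, stated in full; the proofs are below) =====
def Claim_equal_is_host_allowlisted : Prop := ∀ (host : String) (allowlist : List (String × List String)), Dom_is_host_allowlisted host allowlist → Spec_is_host_allowlisted host allowlist (is_host_allowlisted host allowlist)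

-- ===== LEMMAS AND PROOFS =====

-- reference splitter on a single-char separator '.'
def pvSplit (cur : List Char) : List Char → List (List Char)
  | [] => [cur]
  | c :: rest => if c = '.' then cur :: pvSplit [] rest else pvSplit (cur ++ [c]) rest

lemma pvSplit_go (fuel : Nat) : ∀ (l cur : List Char) (acc : List (List Char)),
    l.length < fuel →
    PySem.Chars.splitOn.go ['.'] fuel l cur acc = acc.reverse ++ pvSplit cur.reverse l := by
  induction fuel with
  | zero => intro l cur acc h; omega
  | succ n ih =>
    intro l cur acc h
    rw [PySem.Chars.splitOn.go.eq_def]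
    cases l with
    | nil => simp [pvSplit]
    | cons c rest =>
      simp only []
      by_cases hc : c = '.'
      · have hpre : List.isPrefixOf ['.'] (c :: rest) = true := by simp [hc, List.isPrefixOf]
        simp only [hpre, if_pos]
        have hdrop : List.drop ['.'].length (c :: rest) = rest := rfl
        rw [hdrop, ih rest [] (cur.reverse :: acc) (by simp at h ⊢; omega)]
        simp [pvSplit, hc]
      · have hpre : List.isPrefixOf ['.'] (c :: rest) = false := by
          simp [List.isPrefixOf]; intro hcc; exact absurd hcc.symm hc
        simp only [hpre, Bool.false_eq_true, if_false]
        rw [ih rest (c :: cur) acc (by simp at h ⊢; omega)]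
        simp [pvSplit, hc]

lemma splitOn_eq_pvSplit (s : List Char) :
    PySem.Chars.splitOn s ['.'] = pvSplit [] s := by
  show PySem.Chars.splitOn.go ['.'] (s.length + 1) s [] [] = _
  rw [pvSplit_go (s.length + 1) s [] [] (by omega)]
  simp

lemma pvSplit_ne_nil (l cur : List Char) : pvSplit cur l ≠ [] := by
  induction l generalizing cur with
  | nil => simp [pvSplit]
  | cons c rest ih => by_cases hc : c = '.' <;> simp [pvSplit, hc, ih]

lemma join_pvSplit (l : List Char) : ∀ cur, PySem.Chars.join ['.'] (pvSplit cur l) = cur ++ l := by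
  induction l with
  | nil => intro cur; simp [pvSplit, PySem.Chars.join_singleton]
  | cons c rest ih =>
    intro cur
    by_cases hc : c = '.'
    · have : pvSplit cur (c :: rest) = cur :: pvSplit [] rest := by simp [pvSplit, hc]
      rw [this]
      rcases hq : pvSplit [] rest with _ | ⟨q, t⟩
      · exact absurd hq (pvSplit_ne_nil rest [])
      · rw [PySem.Chars.join_cons_cons]
        have := ih []
        rw [hq] at this
        rw [this]
        simp [hc]
    · have : pvSplit cur (c :: rest) = pvSplit (cur ++ [c]) rest := by simp [pvSplit, hc]
      rw [this, ih (cur ++ [c])]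
      simp

lemma pvSplit_no_dot (l : List Char) : ∀ cur, ('.' : Char) ∉ cur →
    ∀ p ∈ pvSplit cur l, ('.' : Char) ∉ p := by
  induction l with
  | nil => intro cur hcur p hp; simp [pvSplit] at hp; subst hp; exact hcur
  | cons c rest ih =>
    intro cur hcur p hp
    by_cases hc : c = '.'
    · simp [pvSplit, hc] at hp
      rcases hp with rfl | hp
      · exact hcur
      · exact ih [] (by simp) p hp
    · simp [pvSplit, hc] at hp
      exact ih (cur ++ [c]) (by simp [hcur]; intro hdc; exact hc hdc.symm) p hp

-- the key boundary lemma: a '.'-prefixed suffix of p ++ '.' :: jr either is '.' :: jr itself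
-- or lies inside jr, provided p contains no dot
lemma dot_suffix_step (p jr s : List Char) (hp : ('.' : Char) ∉ p) :
    ('.' :: s) <:+ (p ++ '.' :: jr) ↔ (s = jr ∨ ('.' :: s) <:+ jr) := by
  constructor
  · rintro ⟨u, hu⟩
    rcases List.append_eq_append_iff.mp hu with ⟨a, hpa, ha⟩ | ⟨b, hub, hb⟩
    · cases a with
      | nil => left; simpa using ha
      | cons x a' =>
        exfalso
        have hx := (List.cons_eq_cons.mp ha).1
        apply hp
        rw [hpa, ← hx]
        simp
    · cases b with
      | nil => left; simpa using hb.symm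
      | cons x b' =>
        right
        obtain ⟨hx, hb'⟩ := List.cons_eq_cons.mp hb
        exact ⟨b', hb'.symm⟩
  · rintro (rfl | ⟨u, hu⟩)
    · exact ⟨p, rfl⟩
    · exact ⟨p ++ '.' :: u, by simp [← hu]⟩

lemma anyDotSuffix_iff (suf : List (List Char)) (parts : List (List Char))
    (hne : parts ≠ []) (hnd : ∀ p ∈ parts, ('.' : Char) ∉ p) :
    pvAnyDotSuffix parts (PySem.Set.ofList suf) = true ↔
      ∃ s ∈ suf, s = PySem.Chars.join ['.'] parts ∨ ('.' :: s) <:+ PySem.Chars.join ['.'] parts := by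
  induction parts with
  | nil => exact absurd rfl hne
  | cons p rest ih =>
    cases rest with
    | nil =>
      simp only [pvAnyDotSuffix, Bool.or_false, PySem.Set.contains_iff, PySem.Set.mem_ofList,
        PySem.Chars.join_singleton]
      constructor
      · intro hm; exact ⟨p, hm, Or.inl rfl⟩
      · rintro ⟨s, hs, rfl | ⟨u, hu⟩⟩
        · exact hs
        · exfalso
          exact hnd p (by simp) (by rw [← hu]; simp)
    | cons q t =>
      have hj : PySem.Chars.join ['.'] (p :: q :: t) =
          p ++ '.' :: PySem.Chars.join ['.'] (q :: t) := by
        rw [PySem.Chars.join_cons_cons]; simp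
      have hstep := fun s => dot_suffix_step p (PySem.Chars.join ['.'] (q :: t)) s
        (hnd p (by simp))
      have ihr := ih (by simp) (fun x hx => hnd x (List.mem_cons_of_mem p hx))
      have hrec : pvAnyDotSuffix (p :: q :: t) (PySem.Set.ofList suf) =
          (PySem.Set.contains (PySem.Set.ofList suf) (PySem.Chars.join ['.'] (p :: q :: t)) ||
            pvAnyDotSuffix (q :: t) (PySem.Set.ofList suf)) := rfl
      rw [hrec, Bool.or_eq_true, PySem.Set.contains_iff, PySem.Set.mem_ofList, ihr]
      constructor
      · rintro (hm | ⟨s, hs, hcase⟩)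
        · exact ⟨_, hm, Or.inl rfl⟩
        · refine ⟨s, hs, ?_⟩
          rw [hj]
          rcases hcase with rfl | hsuf
          · right; exact (hstep _).mpr (Or.inl rfl)
          · right; exact (hstep _).mpr (Or.inr hsuf)
      · rintro ⟨s, hs, rfl | hsuf⟩
        · exact Or.inl hs
        · rw [hj] at hsuf
          rcases (hstep s).mp hsuf with rfl | hsuf'
          · exact Or.inr ⟨_, hs, Or.inl rfl⟩
          · exact Or.inr ⟨s, hs, Or.inr hsuf'⟩

lemma suffix_loops_agree (h : List Char) (_hne : h ≠ []) (suf : List (List Char)) :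
    suf.any (fun s => h == s || PySem.Chars.endswith h ('.' :: s)) =
      pvAnyDotSuffix (PySem.Chars.splitOn h ['.']) (PySem.Set.ofList suf) := by
  have hsplit := splitOn_eq_pvSplit h
  have hjoin : PySem.Chars.join ['.'] (pvSplit [] h) = h := by
    simpa using join_pvSplit h []
  rw [hsplit]
  rcases Bool.eq_false_or_eq_true (pvAnyDotSuffix (pvSplit [] h) (PySem.Set.ofList suf)) with hb | hb
  swap
  · rw [hb]
    rw [List.any_eq_false]
    intro s hs hor
    rw [Bool.or_eq_true] at hor
    rcases hor with heq | hsuf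
    · have hv : s = PySem.Chars.join ['.'] (pvSplit [] h) := by
        rw [hjoin]; exact (beq_iff_eq.mp heq).symm
      exact absurd ((anyDotSuffix_iff suf (pvSplit [] h) (pvSplit_ne_nil h [])
        (pvSplit_no_dot h [] (by simp))).mpr ⟨s, hs, Or.inl hv⟩) (by rw [hb]; simp)
    · have hv : ('.' :: s) <:+ PySem.Chars.join ['.'] (pvSplit [] h) := by
        rw [hjoin]; exact (PySem.Chars.endswith_iff _ _).mp hsuf
      exact absurd ((anyDotSuffix_iff suf (pvSplit [] h) (pvSplit_ne_nil h [])
        (pvSplit_no_dot h [] (by simp))).mpr ⟨s, hs, Or.inr hv⟩) (by rw [hb]; simp)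
  · rw [hb]
    rcases (anyDotSuffix_iff suf (pvSplit [] h) (pvSplit_ne_nil h [])
      (pvSplit_no_dot h [] (by simp))).mp hb with ⟨s, hs, hcase⟩
    rw [List.any_eq_true]
    refine ⟨s, hs, ?_⟩
    rcases hcase with heq | hsuf
    · rw [hjoin] at heq
      simp [heq]
    · rw [hjoin] at hsuf
      simp [PySem.Chars.endswith_iff, hsuf]

-- ===== VERDICT (by name: the statement is the Claim_ definition above) =====
theorem is_host_allowlisted_spec : Claim_equal_is_host_allowlisted := by
  intro host allowlist _
  unfold Spec_is_host_allowlisted is_host_allowlisted is_host_allowlisted_alt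
  by_cases hh : pv_normalize_host host = []
  · simp [hh]
  · have hgoal := suffix_loops_agree (pv_normalize_host host) hh
      (((PySem.Dict.mk allowlist).getD "allowed_domain_suffixes" []).map
        (fun s : String => PySem.Chars.lower (PySem.Chars.strip s.toList)))
    simp [hh]
    rw [← List.any_map]
    congr 1
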